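-- pv_equiv track=rewrite | github.com/Jintao-Huang/leetcode_notebook | 0 competition/单/119/4 奇偶跳[975].py | next_le_max
-- ===== SOURCE A (Python) =====
-- from typing import List
--
-- def next_le_max(nums: List[int]) -> List[int]:
--     arg = sorted(range(len(nums)), key=lambda i: -nums[i])
--     ans = [-1] * len(arg)
--     st = []
--     for lo in reversed(range(len(arg))):
--         x = arg[lo]
--         while len(st) > 0 and x >= arg[st[-1]]:  # 队列内无相等元素.
--             st.pop()
--         if len(st) > 0:
--             ans[x] = arg[st[-1]]  # ans[hi] = nums[st[-1]]  # st可存数字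
--         st.append(lo)
--     return ans
-- ===== SOURCE B (Python) =====
-- from typing import List
--
-- def next_le_max(nums: List[int]) -> List[int]:
--     n = len(nums)
--     ans = []
--     for i in range(n):
--         best_idx = -1
--         best_val = None
--         for j in range(i + 1, n):
--             if nums[j] <= nums[i] and (best_val is None or nums[j] > best_val):
--                 best_val = nums[j]
--                 best_idx = j
--         ans.append(best_idx)
--     return ans
-- ===== Notes on version B (the rewrite author's own statement) =====
-- stated objective: simpler
-- what changed: A sorts the indices by descending value and runs a monotonic stack over the sorted order; B drops the sort and the stack entirely and, for each index i, directly scans the indices to its right keeping the best candidate (largest value <= nums[i], earliest index on ties).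
import Mathlib
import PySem

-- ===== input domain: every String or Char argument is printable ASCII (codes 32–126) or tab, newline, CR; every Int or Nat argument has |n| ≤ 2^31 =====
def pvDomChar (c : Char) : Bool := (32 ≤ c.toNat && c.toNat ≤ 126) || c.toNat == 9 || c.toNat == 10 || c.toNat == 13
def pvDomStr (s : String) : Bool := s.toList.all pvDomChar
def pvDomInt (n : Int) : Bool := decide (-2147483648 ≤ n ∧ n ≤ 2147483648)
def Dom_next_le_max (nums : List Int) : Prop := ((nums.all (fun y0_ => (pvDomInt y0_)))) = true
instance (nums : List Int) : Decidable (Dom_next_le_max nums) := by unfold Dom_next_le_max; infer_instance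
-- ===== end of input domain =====

-- B replaces A's sort + monotonic-stack algorithm by a direct quadratic scan: for each index i it
-- scans j = i+1 .. n-1 keeping the best later index with nums[j] <= nums[i] (largest value, then
-- smallest index). Objective: simpler; no speed claim.

-- ===== PORT A =====
-- arg = sorted(range(len(nums)), key=lambda i: -nums[i])  (PySem.List.sorted is Python's stable sort)
def pvArg (nums : List Int) : List Int :=
  PySem.List.sorted (PySem.List.pyRange 0 (nums.length : Int) 1)
    (fun i => -(PySem.List.pyGetD nums i 0)) false

-- the inner 'while len(st) > 0 and x >= arg[st[-1]]: st.pop()' (the stack holds earlier loop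
-- counters, all < len(arg), so the Python indexing never raises)
def pvPopA (arg : List Int) (x : Int) (st : List Int) : List Int :=
  if h : st ≠ [] ∧ x ≥ PySem.List.pyGetD arg (PySem.List.pyGetD st (-1) 0) 0 then
    pvPopA arg x st.dropLast
  else st
termination_by st.length
decreasing_by
  have : st.length ≠ 0 := fun h0 => h.1 (List.eq_nil_of_length_eq_zero h0)
  simp [List.length_dropLast]; omega

-- one iteration of 'for lo in reversed(range(len(arg)))' over the state (ans, st)
def pvStepA (arg : List Int) (s : List Int × List Int) (lo : Int) : List Int × List Int :=
  let x := PySem.List.pyGetD arg lo 0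
  let st := pvPopA arg x s.2
  let ans := if st ≠ [] then
      PySem.List.pySetD s.1 x (PySem.List.pyGetD arg (PySem.List.pyGetD st (-1) 0) 0)
    else s.1
  (ans, st ++ [lo])

def next_le_max (nums : List Int) : List Int :=
  let arg := pvArg nums
  (((PySem.List.pyRange 0 (arg.length : Int) 1).reverse).foldl (pvStepA arg)
    (PySem.List.pyRepeat [(-1 : Int)] (arg.length : Int), ([] : List Int))).1

-- ===== PORT B =====
-- inner-loop body of B: keep (best_idx, best_val); strict improvement on the value
def pvBestStep (nums : List Int) (i : Int) (b : Int × Option Int) (j : Int) : Int × Option Int :=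
  let vj := PySem.List.pyGetD nums j 0
  if (decide (vj ≤ PySem.List.pyGetD nums i 0) &&
      (match b.2 with | none => true | some bv => decide (bv < vj))) = true then
    (j, some vj)
  else b

def next_le_max_alt (nums : List Int) : List Int :=
  let n : Int := (nums.length : Int)
  (PySem.List.pyRange 0 n 1).foldl
    (fun ans i =>
      ans ++ [((PySem.List.pyRange (i+1) n 1).foldl (pvBestStep nums i) (-1, none)).1]) []

-- ===== PRECONDITION & SPEC =====
def Spec_next_le_max (nums : List Int) (out : List Int) : Prop := out = next_le_max_alt nums
instance (nums : List Int) (out : List Int) : Decidable (Spec_next_le_max nums out) := by unfold Spec_next_le_max; infer_instance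

-- ===== CLAIM (what is proved, stated in full; the proofs are below) =====
def Claim_equal_next_le_max : Prop := ∀ (nums : List Int), Dom_next_le_max nums → Spec_next_le_max nums (next_le_max nums)

-- ===== LEMMAS AND PROOFS =====

def pvLex {α : Type} (key : α → Int) (R : α → α → Prop) (a b : α) : Prop :=
  key a < key b ∨ (key a = key b ∧ R a b)

theorem pv_insertBy_pairwise {α : Type} (key : α → Int) (R : α → α → Prop)
    (x : α) (acc : List α) (hacc : acc.Pairwise (pvLex key R))
    (hall : ∀ a ∈ acc, R a x) :
    (PySem.List.insertBy (fun a b => decide (key a < key b)) x acc).Pairwise (pvLex key R) := by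
  induction acc with
  | nil => simp [PySem.List.insertBy]
  | cons y ys ih =>
    rcases List.pairwise_cons.mp hacc with ⟨hy, hys⟩
    show (if (decide (key x < key y)) = true then x :: y :: ys
          else y :: PySem.List.insertBy (fun a b => decide (key a < key b)) x ys).Pairwise _
    by_cases hxy : key x < key y
    · simp only [hxy, decide_true, if_true]
      refine List.pairwise_cons.mpr ⟨?_, hacc⟩
      intro z hz
      rcases List.mem_cons.mp hz with rfl | hz
      · exact Or.inl hxy
      · rcases hy z hz with h | ⟨h, _⟩
        · exact Or.inl (lt_trans hxy h)
        · exact Or.inl (h ▸ hxy)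
    · simp only [hxy, decide_false, if_false]
      refine List.pairwise_cons.mpr ⟨?_, ih hys (fun a ha => hall a (List.mem_cons_of_mem _ ha))⟩
      intro z hz
      rcases (PySem.List.mem_insertBy _ _ _ _).mp hz with rfl | hz
      · rcases lt_or_eq_of_le (le_of_not_gt hxy) with h | h
        · exact Or.inl h
        · exact Or.inr ⟨h, hall y (List.mem_cons_self)⟩
      · exact hy z hz

theorem pv_sorted_foldl_pairwise {α : Type} (key : α → Int) (R : α → α → Prop)
    (xs : List α) : ∀ acc, acc.Pairwise (pvLex key R) →
    (∀ a ∈ acc, ∀ x ∈ xs, R a x) → xs.Pairwise R →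
    (xs.foldl (fun acc x => PySem.List.insertBy (fun a b => decide (key a < key b)) x acc) acc).Pairwise (pvLex key R) := by
  induction xs with
  | nil => intro acc h _ _; simpa using h
  | cons x xs ih =>
    intro acc hacc hfut hxs
    rcases List.pairwise_cons.mp hxs with ⟨hx, hxs'⟩
    simp only [List.foldl_cons]
    apply ih
    · exact pv_insertBy_pairwise key R x acc hacc (fun a ha => hfut a ha x List.mem_cons_self)
    · intro a ha y hy
      rcases (PySem.List.mem_insertBy _ _ _ _).mp ha with rfl | ha
      · exact hx y hy
      · exact hfut a ha y (List.mem_cons_of_mem _ hy)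
    · exact hxs'

theorem pv_sorted_pairwise_stable {α : Type} (key : α → Int) (R : α → α → Prop)
    (xs : List α) (hxs : xs.Pairwise R) :
    (PySem.List.sorted xs key false).Pairwise (pvLex key R) := by
  rw [PySem.List.sorted_eq_foldl_insertBy]
  exact pv_sorted_foldl_pairwise key R xs [] (by simp) (by simp) hxs

def pvAv (A : List Int) (p : Int) : Int := PySem.List.pyGetD A p 0

theorem pv_foldl_filter {α β : Type} (f : β → α → β) (P : α → Bool) (l : List α)
    (hf : ∀ s a, a ∈ l → P a = false → f s a = s) :
    ∀ s, l.foldl f s = (l.filter P).foldl f s := by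
  induction l with
  | nil => intro s; rfl
  | cons a l ih =>
    intro s
    by_cases ha : P a = true
    · simp only [List.foldl_cons, List.filter_cons, ha, if_true]
      exact ih (fun s b hb h => hf s b (List.mem_cons_of_mem _ hb) h) _
    · have ha' : P a = false := by simpa using ha
      simp only [List.foldl_cons, List.filter_cons, ha']
      rw [hf s a List.mem_cons_self ha']
      exact ih (fun s b hb h => hf s b (List.mem_cons_of_mem _ hb) h) _

theorem pv_foldl_append_singleton {α β : Type} (g : α → β) (l : List α) :
    ∀ acc, l.foldl (fun ans i => ans ++ [g i]) acc = acc ++ l.map g := by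
  induction l with
  | nil => simp
  | cons a l ih => intro acc; simp [ih]

theorem pv_head?_filter_eq_of {α : Type} (P Q : α → Bool) (R : List α)
    (h1 : ∀ p ∈ R, P p = true → Q p = true)
    (h2 : ∀ m, (R.filter Q).head? = some m → P m = true) :
    (R.filter Q).head? = (R.filter P).head? := by
  induction R with
  | nil => rfl
  | cons r R ih =>
    by_cases hq : Q r = true
    · have hp : P r = true := h2 r (by simp [List.filter_cons, hq])
      simp [List.filter_cons, hq, hp]
    · have hq' : Q r = false := by simpa using hq
      have hp' : P r = false := by
        by_contra h
        exact hq (h1 r List.mem_cons_self (by simpa using h))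
      simp only [List.filter_cons, hq', hp', if_neg, Bool.false_eq_true, not_false_iff]
      exact ih (fun p hp => h1 p (List.mem_cons_of_mem _ hp))
        (fun m hm => h2 m (by simpa [List.filter_cons, hq'] using hm))

theorem pv_find?_min {α : Type} [LinearOrder α] (Q : α → Bool) (l : List α)
    (hl : l.Pairwise (· < ·)) (m : α) (h : l.find? Q = some m) :
    ∀ q ∈ l, q < m → Q q = false := by
  induction l with
  | nil => simp
  | cons a l ih =>
    rcases List.pairwise_cons.mp hl with ⟨ha, hl'⟩
    by_cases hqa : Q a = true
    · rw [List.find?_cons_of_pos hqa] at h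
      cases h
      intro q hq hqm
      rcases List.mem_cons.mp hq with rfl | hq
      · exact absurd hqm (lt_irrefl _)
      · exact absurd (ha q hq) (not_lt.mpr (le_of_lt hqm))
    · have hqa' : Q a = false := by simpa using hqa
      rw [List.find?_cons_of_neg (by simp [hqa'])] at h
      intro q hq hqm
      rcases List.mem_cons.mp hq with rfl | hq
      · exact hqa'
      · exact ih hl' h q hq hqm

theorem pv_dropWhile_eq_filter (A : List Int) (x : Int) (l : List Int)
    (hl : l.Pairwise (fun a b => pvAv A a < pvAv A b)) :
    l.dropWhile (fun p => decide (pvAv A p ≤ x)) = l.filter (fun p => decide (x < pvAv A p)) := by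
  induction l with
  | nil => rfl
  | cons p t ih =>
    rcases List.pairwise_cons.mp hl with ⟨hp, ht⟩
    by_cases hle : pvAv A p ≤ x
    · rw [List.dropWhile_cons_of_pos (by simpa using hle),
        List.filter_cons_of_neg (by simpa using not_lt.mpr hle)]
      exact ih ht
    · rw [List.dropWhile_cons_of_neg (by simpa using hle),
        List.filter_cons_of_pos (by simpa using not_le.mp hle)]
      congr 1
      symm
      rw [List.filter_eq_self]
      intro q hq
      have := hp q hq
      simp; omega

def pvV (nums : List Int) (j : Int) : Int := PySem.List.pyGetD nums j 0

theorem pv_arg_perm (nums : List Int) :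
    (pvArg nums).Perm (PySem.List.pyRange 0 (nums.length : Int) 1) :=
  PySem.List.sorted_perm _ _ _

theorem pv_arg_length (nums : List Int) : (pvArg nums).length = nums.length := by
  rw [(pv_arg_perm nums).length_eq, PySem.List.length_pyRange_one]
  omega

theorem pv_arg_mem (nums : List Int) (j : Int) :
    j ∈ pvArg nums ↔ 0 ≤ j ∧ j < (nums.length : Int) := by
  rw [(pv_arg_perm nums).mem_iff, PySem.List.mem_pyRange_one]

theorem pv_arg_nodup (nums : List Int) : (pvArg nums).Nodup :=
  (pv_arg_perm nums).nodup_iff.mpr (PySem.List.nodup_pyRange_one _ _)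

theorem pv_arg_lex (nums : List Int) :
    (pvArg nums).Pairwise (pvLex (fun i => -(pvV nums i)) (· < ·)) :=
  pv_sorted_pairwise_stable _ _ _ (PySem.List.pairwise_lt_pyRange_one _ _)

theorem pv_arg_lex_at (nums : List Int) (p q : Nat)
    (hp : p < (pvArg nums).length) (hq : q < (pvArg nums).length) (hpq : p < q) :
    pvLex (fun i => -(pvV nums i)) (· < ·) (pvArg nums)[p] (pvArg nums)[q] :=
  List.pairwise_iff_getElem.mp (pv_arg_lex nums) p q hp hq hpq

def pvRecB (A : List Int) (c p : Int) : Bool :=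
  (PySem.List.pyRange c p 1).all (fun q => decide (pvAv A q < pvAv A p))

def pvStk (A : List Int) (c : Int) : List Int :=
  (PySem.List.pyRange c (A.length : Int) 1).filter (pvRecB A c)

theorem pv_popA_reverse (A : List Int) (x : Int) (l : List Int) :
    pvPopA A x l.reverse = (l.dropWhile (fun p => decide (pvAv A p ≤ x))).reverse := by
  induction l with
  | nil => rw [pvPopA]; simp
  | cons p t ih =>
    rw [List.reverse_cons, pvPopA]
    by_cases hle : pvAv A p ≤ x
    · rw [dif_pos ⟨by simp, by rw [PySem.List.pyGetD_neg_one_append_singleton]; exact hle⟩]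
      rw [List.dropLast_concat, ih, List.dropWhile_cons_of_pos (by simpa using hle)]
    · rw [dif_neg (by rw [PySem.List.pyGetD_neg_one_append_singleton]; intro h; exact hle h.2),
        List.dropWhile_cons_of_neg (by simpa using hle), List.reverse_cons]

theorem pv_mem_stk (A : List Int) (c p : Int) :
    p ∈ pvStk A c ↔ (c ≤ p ∧ p < (A.length : Int) ∧ pvRecB A c p = true) := by
  simp [pvStk, List.mem_filter, PySem.List.mem_pyRange_one, and_assoc]

theorem pv_recB_all (A : List Int) (c p q : Int) (h : pvRecB A c p = true)
    (h1 : c ≤ q) (h2 : q < p) : pvAv A q < pvAv A p := by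
  have := List.all_eq_true.mp h q (PySem.List.mem_pyRange_one.mpr ⟨h1, h2⟩)
  simpa using this

theorem pv_stk_pairwise_lt (A : List Int) (c : Int) : (pvStk A c).Pairwise (· < ·) :=
  (PySem.List.pairwise_lt_pyRange_one _ _).filter _

theorem pv_stk_val_ascending (A : List Int) (c : Int) :
    (pvStk A c).Pairwise (fun a b => pvAv A a < pvAv A b) := by
  refine List.Pairwise.imp_of_mem ?_ (pv_stk_pairwise_lt A c)
  intro a b ha hb hab
  rcases (pv_mem_stk A c b).mp hb with ⟨_, _, hrec⟩
  rcases (pv_mem_stk A c a).mp ha with ⟨hca, _, _⟩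
  exact pv_recB_all A c b a hrec hca hab

theorem pv_recB_refl (A : List Int) (c : Int) : pvRecB A c c = true := by
  simp [pvRecB, PySem.List.pyRange_one_eq_nil (le_refl c)]

theorem pv_recB_split (A : List Int) (c p : Int) (h : c < p) :
    pvRecB A c p = (decide (pvAv A c < pvAv A p) && pvRecB A (c+1) p) := by
  rw [pvRecB, PySem.List.pyRange_one_cons h, List.all_cons]
  rfl

theorem pv_stk_cons (A : List Int) (c : Int) (h : c < (A.length : Int)) :
    pvStk A c = c :: (PySem.List.pyRange (c+1) (A.length : Int) 1).filter (pvRecB A c) := by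
  rw [pvStk, PySem.List.pyRange_one_cons h, List.filter_cons, if_pos (by simp [pv_recB_refl])]

theorem pv_stk_filter (A : List Int) (c : Int) :
    (pvStk A (c+1)).filter (fun p => decide (pvAv A c < pvAv A p))
      = (PySem.List.pyRange (c+1) (A.length : Int) 1).filter (pvRecB A c) := by
  rw [pvStk, List.filter_filter]
  refine List.filter_congr ?_
  intro p hp
  have hcp : c < p := lt_of_lt_of_le (lt_add_one c) (PySem.List.mem_pyRange_one.mp hp).1
  rw [pv_recB_split A c p hcp, Bool.and_comm]

def pvUpd (nums : List Int) (c : Nat) (ans : List Int) : List Int :=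
  match ((PySem.List.pyRange ((c : Int)+1) ((pvArg nums).length : Int) 1).filter
      (pvRecB (pvArg nums) (c : Int))).head? with
  | some p => PySem.List.pySetD ans (pvAv (pvArg nums) (c : Int)) (pvAv (pvArg nums) p)
  | none => ans

def pvUpdAll (nums : List Int) : Nat → List Int → List Int
  | 0, ans => ans
  | c+1, ans => pvUpdAll nums c (pvUpd nums c ans)

theorem pv_step_lemma (nums : List Int) (c : Nat) (hc : (c : Int) < ((pvArg nums).length : Int))
    (ans : List Int) :
    pvStepA (pvArg nums) (ans, (pvStk (pvArg nums) ((c : Int)+1)).reverse) (c : Int)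
      = (pvUpd nums c ans, (pvStk (pvArg nums) (c : Int)).reverse) := by
  set A := pvArg nums with hA
  have hx : PySem.List.pyGetD A (c : Int) 0 = pvAv A (c : Int) := rfl
  have hst : pvPopA A (pvAv A (c : Int)) ((pvStk A ((c : Int)+1)).reverse)
      = ((PySem.List.pyRange ((c : Int)+1) (A.length : Int) 1).filter (pvRecB A (c : Int))).reverse := by
    rw [pv_popA_reverse, pv_dropWhile_eq_filter A _ _ (pv_stk_val_ascending A _)]
    congr 1
    exact pv_stk_filter A (c : Int)
  show pvStepA A _ _ = _
  rw [pvStepA]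
  simp only [hx, hst]
  set Tl := (PySem.List.pyRange ((c : Int)+1) (A.length : Int) 1).filter (pvRecB A (c : Int)) with hTl
  have hstk : (c : Int) :: Tl = pvStk A (c : Int) := (pv_stk_cons A _ hc).symm
  cases hTlc : Tl with
  | nil =>
    simp only [List.reverse_nil, ne_eq, not_true_eq_false, List.nil_append]
    rw [pvUpd]
    simp only [← hA, ← hTl, hTlc, List.head?_nil]
    rw [← hstk, hTlc]
    simp
  | cons hd tl =>
    have hne : (hd :: tl).reverse ≠ [] := by simp
    simp only [ne_eq, hne, not_false_iff, if_pos]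
    rw [List.reverse_cons, PySem.List.pyGetD_neg_one_append_singleton]
    rw [pvUpd]
    simp only [← hA, ← hTl, hTlc, List.head?_cons]
    rw [← hstk, hTlc]
    simp [pvAv]

theorem pv_loop_lemma (nums : List Int) (k : Nat) (hk : k ≤ (pvArg nums).length) :
    ∀ ans, ((PySem.List.pyRange 0 (k : Int) 1).reverse).foldl (pvStepA (pvArg nums))
        (ans, (pvStk (pvArg nums) (k : Int)).reverse)
      = (pvUpdAll nums k ans, (pvStk (pvArg nums) 0).reverse) := by
  induction k with
  | zero =>
    intro ans
    rw [PySem.List.pyRange_one_eq_nil (by norm_num)]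
    rfl
  | succ k ih =>
    intro ans
    have hdec : (PySem.List.pyRange 0 ((k+1 : Nat) : Int) 1).reverse
        = (k : Int) :: (PySem.List.pyRange 0 (k : Int) 1).reverse := by
      push_cast
      rw [PySem.List.pyRange_one_succ_right (by positivity), List.reverse_append]
      rfl
    rw [hdec, List.foldl_cons]
    have hcast : ((k : Int) + 1) = (((k+1 : Nat)) : Int) := by push_cast; ring
    have hc : (k : Int) < ((pvArg nums).length : Int) := by exact_mod_cast hk
    rw [show ((k+1 : Nat) : Int) = (k : Int) + 1 by push_cast; ring] at *
    rw [pv_step_lemma nums k hc ans]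
    exact ih (le_of_lt hk) (pvUpd nums k ans)

theorem pv_stk_top (nums : List Int) :
    pvStk (pvArg nums) (((pvArg nums).length : Nat) : Int) = [] := by
  rw [pvStk, PySem.List.pyRange_one_eq_nil (le_refl _)]
  rfl

theorem pv_A_eq_updAll (nums : List Int) :
    next_le_max nums = pvUpdAll nums (pvArg nums).length
      (List.replicate (pvArg nums).length (-1)) := by
  rw [next_le_max]
  have h1 : PySem.List.pyRepeat [(-1 : Int)] (((pvArg nums).length : Nat) : Int)
      = List.replicate (pvArg nums).length (-1) := by
    rw [PySem.List.pyRepeat_singleton]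
    norm_num
  have h2 : ([] : List Int) = (pvStk (pvArg nums) (((pvArg nums).length : Nat) : Int)).reverse := by
    rw [pv_stk_top]; rfl
  rw [h1, h2, pv_loop_lemma nums (pvArg nums).length (le_refl _)]

def pvHit (nums : List Int) (c : Nat) : Option Int :=
  (((PySem.List.pyRange ((c : Int)+1) ((pvArg nums).length : Int) 1).filter
      (pvRecB (pvArg nums) (c : Int))).head?).map (pvAv (pvArg nums))

theorem pv_upd_length (nums : List Int) (c : Nat) (ans : List Int) :
    (pvUpd nums c ans).length = ans.length := by
  rw [pvUpd]
  cases h : (((PySem.List.pyRange ((c : Int)+1) ((pvArg nums).length : Int) 1).filter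
      (pvRecB (pvArg nums) (c : Int))).head?) with
  | none => rfl
  | some p => simp [PySem.List.length_pySetD]

theorem pv_updAll_length (nums : List Int) (k : Nat) :
    ∀ ans, (pvUpdAll nums k ans).length = ans.length := by
  induction k with
  | zero => intro ans; rfl
  | succ k ih => intro ans; rw [pvUpdAll, ih, pv_upd_length]

theorem pv_av_getElem (nums : List Int) (c : Nat) (hc : c < (pvArg nums).length) :
    pvAv (pvArg nums) (c : Int) = (pvArg nums)[c] := by
  rw [pvAv, PySem.List.pyGetD_natCast, List.getD_eq_getElem?_getD, List.getElem?_eq_getElem hc]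
  rfl

theorem pv_upd_getD (nums : List Int) (c : Nat) (hc : c < (pvArg nums).length)
    (ans : List Int) (hlen : ans.length = (pvArg nums).length)
    (i : Nat) (hi : i < (pvArg nums).length) :
    (pvUpd nums c ans).getD i 0 =
      if (pvArg nums).idxOf (i : Int) = c then (pvHit nums c).getD (ans.getD i 0)
      else ans.getD i 0 := by
  have hmem : (i : Int) ∈ pvArg nums := by
    rw [pv_arg_mem]
    constructor
    · positivity
    · rw [← pv_arg_length nums]; exact_mod_cast hi
  have hposlt := List.idxOf_lt_length_of_mem hmem
  have hpos : (pvArg nums)[(pvArg nums).idxOf (i : Int)] = (i : Int) := List.getElem_idxOf _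
  rw [pvUpd, pvHit]
  cases h : (((PySem.List.pyRange ((c : Int)+1) ((pvArg nums).length : Int) 1).filter
      (pvRecB (pvArg nums) (c : Int))).head?) with
  | none => simp
  | some p =>
    simp only [Option.map_some, Option.getD_some]
    simp only [pv_av_getElem nums c hc]
    have hnn : (0 : Int) ≤ (pvArg nums)[c] := ((pv_arg_mem nums _).mp (List.getElem_mem hc)).1
    rw [PySem.List.pySetD_of_nonneg _ _ hnn]
    by_cases he : (pvArg nums).idxOf (i : Int) = c
    · subst he
      have hthis : (pvArg nums)[(pvArg nums).idxOf ((i : Nat) : Int)] = (i : Int) := hpos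
      have ht : ((pvArg nums)[(pvArg nums).idxOf ((i : Nat) : Int)]).toNat = i := by omega
      rw [if_pos rfl, ht]
      simp [List.getD_eq_getElem?_getD, show i < ans.length by omega]
    · have hne : ((pvArg nums)[c]).toNat ≠ i := by
        intro hteq
        have : (pvArg nums)[c] = (i : Int) := by omega
        exact he ((List.Nodup.getElem_inj_iff (pv_arg_nodup nums)).mp (hpos.trans this.symm))
      rw [if_neg he]
      rw [List.getD_eq_getElem?_getD, List.getD_eq_getElem?_getD, List.getElem?_set_ne hne]

def pvOutA (nums : List Int) (c : Int) : Int :=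
  match ((PySem.List.pyRange (c+1) ((pvArg nums).length : Int) 1).filter
      (pvRecB (pvArg nums) c)).head? with
  | some p => pvAv (pvArg nums) p
  | none => -1

theorem pv_updAll_getD (nums : List Int) (k : Nat) (hk : k ≤ (pvArg nums).length) :
    ∀ ans, ans.length = (pvArg nums).length → ∀ i : Nat, i < (pvArg nums).length →
    (pvUpdAll nums k ans).getD i 0 =
      if (pvArg nums).idxOf (i : Int) < k
      then (pvHit nums ((pvArg nums).idxOf (i : Int))).getD (ans.getD i 0)
      else ans.getD i 0 := by
  induction k with
  | zero => intro ans _ i _; simp [pvUpdAll]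
  | succ k ih =>
    intro ans hlen i hi
    rw [pvUpdAll]
    rw [ih (by omega) (pvUpd nums k ans) (by rw [pv_upd_length, hlen]) i hi]
    have hupd := pv_upd_getD nums k (by omega) ans hlen i hi
    set c := (pvArg nums).idxOf (i : Int) with hcdef
    by_cases h1 : c < k
    · rw [if_pos h1, if_pos (by omega)]
      rw [hupd, if_neg (by omega)]
    · by_cases h2 : c = k
      · rw [if_neg h1, if_pos (by omega)]
        rw [hupd, if_pos h2, h2]
      · rw [if_neg h1, if_neg (by omega)]
        rw [hupd, if_neg h2]

theorem pv_A_getD (nums : List Int) (i : Nat) (hi : i < (pvArg nums).length) :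
    (next_le_max nums).getD i 0 = pvOutA nums (((pvArg nums).idxOf (i : Int) : Nat) : Int) := by
  rw [pv_A_eq_updAll]
  have hmem : (i : Int) ∈ pvArg nums := by
    rw [pv_arg_mem]
    refine ⟨by positivity, ?_⟩
    rw [← pv_arg_length nums]; exact_mod_cast hi
  have hposlt := List.idxOf_lt_length_of_mem hmem
  rw [pv_updAll_getD nums _ (le_refl _) _ (by simp) i hi, if_pos hposlt]
  have hrep : (List.replicate (pvArg nums).length (-1 : Int)).getD i 0 = -1 := by
    simp [List.getD_eq_getElem?_getD, hi]
  rw [hrep, pvHit, pvOutA]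
  cases h : ((PySem.List.pyRange ((((pvArg nums).idxOf (i : Int) : Nat) : Int)+1) ((pvArg nums).length : Int) 1).filter
      (pvRecB (pvArg nums) (((pvArg nums).idxOf (i : Int) : Nat) : Int))).head? with
  | none => rfl
  | some p => rfl

theorem pv_A_length (nums : List Int) : (next_le_max nums).length = nums.length := by
  rw [pv_A_eq_updAll, pv_updAll_length]
  simp [pv_arg_length]

def pvCands (nums : List Int) (i : Int) : List Int :=
  (PySem.List.pyRange (i+1) (nums.length : Int) 1).filter
    (fun j => decide (pvV nums j ≤ pvV nums i))

theorem pv_best_eq_cands (nums : List Int) (i : Int) :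
    (PySem.List.pyRange (i+1) (nums.length : Int) 1).foldl (pvBestStep nums i) (-1, none)
      = (pvCands nums i).foldl (pvBestStep nums i) (-1, none) := by
  rw [pvCands]
  apply pv_foldl_filter
  intro s a _ ha
  rw [pvBestStep]
  simp only [show pvV nums a = PySem.List.pyGetD nums a 0 from rfl] at ha
  simp only [show pvV nums i = PySem.List.pyGetD nums i 0 from rfl] at ha
  simp [ha]

theorem pv_fold_char (nums : List Int) (i : Int) (l : List Int)
    (hl : l.Pairwise (· < ·)) (hle : ∀ j ∈ l, pvV nums j ≤ pvV nums i) :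
    (l = [] ∧ l.foldl (pvBestStep nums i) (-1, none) = (-1, none)) ∨
    (∃ bi, bi ∈ l ∧ l.foldl (pvBestStep nums i) (-1, none) = (bi, some (pvV nums bi)) ∧
      ∀ j ∈ l, pvV nums j < pvV nums bi ∨ (pvV nums j = pvV nums bi ∧ bi ≤ j)) := by
  induction l using List.reverseRecOn with
  | nil => left; exact ⟨rfl, rfl⟩
  | append_singleton l j ih =>
    have hlp : l.Pairwise (· < ·) := hl.sublist (List.sublist_append_left _ _)
    have hallj : ∀ a ∈ l, a < j := by
      intro a ha
      have := List.pairwise_append.mp hl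
      exact this.2.2 a ha j (List.mem_singleton_self j)
    have hlej : pvV nums j ≤ pvV nums i := hle j (List.mem_append_right _ (List.mem_singleton_self j))
    rw [List.foldl_append]
    rcases ih hlp (fun a ha => hle a (List.mem_append_left _ ha)) with ⟨hnil, hfold⟩ | ⟨bi, hbi, hfold, hdom⟩
    · right
      refine ⟨j, by simp, ?_, ?_⟩
      · rw [hfold]
        simp only [pvV] at hlej
        simp [pvBestStep, pvV, hlej]
      · intro a ha
        rcases List.mem_append.mp ha with ha | ha
        · rw [hnil] at ha; cases ha
        · rw [List.mem_singleton.mp ha]; right; exact ⟨rfl, le_refl _⟩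
    · rw [hfold]
      by_cases himp : pvV nums bi < pvV nums j
      · right
        refine ⟨j, by simp, ?_, ?_⟩
        · simp only [pvV] at hlej himp
          simp [pvBestStep, pvV, hlej, himp]
        · intro a ha
          rcases List.mem_append.mp ha with ha | ha
          · rcases hdom a ha with h | ⟨h, _⟩
            · left; omega
            · left; omega
          · rw [List.mem_singleton.mp ha]; right; exact ⟨rfl, le_refl _⟩
      · right
        refine ⟨bi, List.mem_append_left _ hbi, ?_, ?_⟩
        · simp only [pvV] at himp
          simp [pvBestStep, pvV, himp]
        · intro a ha
          rcases List.mem_append.mp ha with ha | ha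
          · exact hdom a ha
          · rw [List.mem_singleton.mp ha]
            rcases lt_or_eq_of_le (not_lt.mp himp) with h | h
            · left; exact h
            · right; exact ⟨h, le_of_lt (hallj bi hbi)⟩

theorem pv_corr_fwd (nums : List Int) (i : Nat) (hi : i < nums.length) (j : Int)
    (hj : j ∈ pvCands nums (i : Int)) :
    ∃ p : Nat, p < (pvArg nums).length ∧ ((pvArg nums).idxOf (i : Int) < p) ∧
      pvAv (pvArg nums) ((p : Nat) : Int) = j := by
  rcases List.mem_filter.mp hj with ⟨hjr, hjv⟩
  rcases PySem.List.mem_pyRange_one.mp hjr with ⟨hj1, hj2⟩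
  have hjv' : pvV nums j ≤ pvV nums (i : Int) := of_decide_eq_true hjv
  have hmemj : j ∈ pvArg nums := (pv_arg_mem nums j).mpr ⟨by omega, hj2⟩
  have hmemi : (i : Int) ∈ pvArg nums := (pv_arg_mem nums _).mpr
    ⟨by positivity, by exact_mod_cast hi⟩
  set A := pvArg nums with hA
  set p := A.idxOf j with hp
  set c := A.idxOf (i : Int) with hc
  have hplt : p < A.length := List.idxOf_lt_length_of_mem hmemj
  have hclt : c < A.length := List.idxOf_lt_length_of_mem hmemi
  have hAp : A[p] = j := List.getElem_idxOf _
  have hAc : A[c] = (i : Int) := List.getElem_idxOf _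
  refine ⟨p, hplt, ?_, by rw [pv_av_getElem nums p hplt, hAp]⟩
  rcases lt_trichotomy p c with h | h | h
  · exfalso
    rcases pv_arg_lex_at nums p c hplt hclt h with hlt | ⟨heq, hltidx⟩
    · rw [hAp, hAc] at hlt
      have hlt2 : -(pvV nums j) < -(pvV nums (i : Int)) := by simpa using hlt
      simp only [pvV] at hjv' hlt2
      omega
    · rw [hAp, hAc] at hltidx
      omega
  · exfalso
    have h1 : A[p]? = some j := by rw [List.getElem?_eq_getElem hplt, hAp]
    have h2 : A[c]? = some (i : Int) := by rw [List.getElem?_eq_getElem hclt, hAc]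
    rw [h, h2] at h1
    simp only [Option.some_inj] at h1
    omega
  · exact h

theorem pv_corr_bwd (nums : List Int) (i : Nat) (hi : i < nums.length) (p : Nat)
    (hplt : p < (pvArg nums).length) (hcp : (pvArg nums).idxOf (i : Int) < p)
    (hQ : (i : Int) < pvAv (pvArg nums) ((p : Nat) : Int)) :
    pvAv (pvArg nums) ((p : Nat) : Int) ∈ pvCands nums (i : Int) := by
  have hmemi : (i : Int) ∈ pvArg nums := (pv_arg_mem nums _).mpr
    ⟨by positivity, by exact_mod_cast hi⟩
  set A := pvArg nums with hA
  set c := A.idxOf (i : Int) with hc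
  have hclt : c < A.length := List.idxOf_lt_length_of_mem hmemi
  have hAc : A[c] = (i : Int) := List.getElem_idxOf _
  have hAv : pvAv A ((p : Nat) : Int) = A[p] := pv_av_getElem nums p hplt
  have hmemj : A[p] ∈ A := List.getElem_mem hplt
  rcases (pv_arg_mem nums _).mp hmemj with ⟨hj0, hjn⟩
  rw [hAv]
  refine List.mem_filter.mpr ⟨PySem.List.mem_pyRange_one.mpr ⟨by rw [hAv] at hQ; omega, hjn⟩, ?_⟩
  rcases pv_arg_lex_at nums c p hclt hplt hcp with hlt | ⟨heq, _⟩
  · rw [hAc] at hlt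
    have hlt2 : -(pvV nums (i : Int)) < -(pvV nums (A[p])) := by simpa using hlt
    refine decide_eq_true ?_
    simp only [pvV] at hlt2 ⊢
    omega
  · rw [hAc] at heq
    have heq2 : -(pvV nums (i : Int)) = -(pvV nums (A[p])) := by simpa using heq
    refine decide_eq_true ?_
    simp only [pvV] at heq2 ⊢
    omega

theorem pv_out_eq (nums : List Int) (i : Nat) (hi : i < nums.length) :
    pvOutA nums (((pvArg nums).idxOf (i : Int) : Nat) : Int)
      = ((pvCands nums (i : Int)).foldl (pvBestStep nums (i : Int)) (-1, none)).1 := by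
  have hmemi : (i : Int) ∈ pvArg nums := (pv_arg_mem nums _).mpr
    ⟨by positivity, by exact_mod_cast hi⟩
  set A := pvArg nums with hA
  set c := A.idxOf (i : Int) with hc
  have hclt : c < A.length := List.idxOf_lt_length_of_mem hmemi
  have hAc : A[c] = (i : Int) := List.getElem_idxOf _
  have hAvc : pvAv A ((c : Nat) : Int) = (i : Int) := by rw [pv_av_getElem nums c hclt, hAc]
  set R := PySem.List.pyRange ((c : Int)+1) (A.length : Int) 1 with hR
  set Q : Int → Bool := fun p => decide ((i : Int) < pvAv A p) with hQ
  have hmemR : ∀ p ∈ R, (c : Int) + 1 ≤ p ∧ p < (A.length : Int) := by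
    intro p hp; exact PySem.List.mem_pyRange_one.mp hp
  have h1 : ∀ p ∈ R, pvRecB A (c : Int) p = true → Q p = true := by
    intro p hp hrec
    have := pv_recB_all A (c : Int) p (c : Int) hrec (le_refl _) (by have := (hmemR p hp).1; omega)
    rw [hAvc] at this
    exact decide_eq_true this
  have h2 : ∀ m, (R.filter Q).head? = some m → pvRecB A (c : Int) m = true := by
    intro m hm
    rw [List.head?_filter] at hm
    have hQm' : Q m = true := List.find?_some hm
    have hQm : (i : Int) < pvAv A m := by rw [hQ] at hQm'; simpa using hQm'
    have hmR : m ∈ R := List.mem_of_find?_eq_some hm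
    have hmin := pv_find?_min Q R (hR ▸ PySem.List.pairwise_lt_pyRange_one _ _) m hm
    rcases hmemR m hmR with ⟨hm1, hm2⟩
    rw [pvRecB]
    refine List.all_eq_true.mpr ?_
    intro q hq
    rcases PySem.List.mem_pyRange_one.mp hq with ⟨hq1, hq2⟩
    by_cases hqc : q = (c : Int)
    · subst hqc
      rw [hAvc]
      exact decide_eq_true hQm
    · have hqR : q ∈ R := PySem.List.mem_pyRange_one.mpr ⟨by omega, by omega⟩
      have := hmin q hqR hq2
      have hqle : ¬ ((i : Int) < pvAv A q) := by
        intro hcon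
        rw [hQ] at this
        simp only [decide_eq_false_iff_not] at this
        exact this hcon
      refine decide_eq_true ?_
      omega
  have hswitch : (R.filter Q).head? = (R.filter (pvRecB A (c : Int))).head? :=
    pv_head?_filter_eq_of (pvRecB A (c : Int)) Q R h1 h2
  have hcands_pw : (pvCands nums (i : Int)).Pairwise (· < ·) :=
    (PySem.List.pairwise_lt_pyRange_one _ _).filter _
  have hcands_le : ∀ j ∈ pvCands nums (i : Int), pvV nums j ≤ pvV nums (i : Int) := by
    intro j hj
    exact of_decide_eq_true (List.mem_filter.mp hj).2
  rw [pvOutA]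
  rw [show ((((c : Nat) : Int)) + 1) = ((c : Int) + 1) from rfl]
  rw [← hA, ← hR, ← hswitch]
  cases hhd : (R.filter Q).head? with
  | none =>
    have hfe : R.filter Q = [] := List.head?_eq_none_iff.mp hhd
    have hcnil : pvCands nums (i : Int) = [] := by
      by_contra hne
      rcases List.exists_mem_of_ne_nil _ hne with ⟨j, hj⟩
      rcases pv_corr_fwd nums i hi j hj with ⟨p, hplt0, hcp0, hAvp0⟩
      have hplt : p < A.length := hplt0
      have hcp : c < p := hcp0
      have hAvp : pvAv A ((p : Nat) : Int) = j := hAvp0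
      have hjc := List.mem_filter.mp hj
      rcases PySem.List.mem_pyRange_one.mp hjc.1 with ⟨hj1, _⟩
      have hpR : ((p : Nat) : Int) ∈ R := PySem.List.mem_pyRange_one.mpr ⟨by omega, by exact_mod_cast hplt⟩
      have hpQ : Q ((p : Nat) : Int) = true := decide_eq_true (by rw [hAvp]; omega)
      have : ((p : Nat) : Int) ∈ R.filter Q := List.mem_filter.mpr ⟨hpR, hpQ⟩
      rw [hfe] at this
      cases this
    rw [hcnil]
    rfl
  | some m =>
    rw [List.head?_filter] at hhd
    have hQm' : Q m = true := List.find?_some hhd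
    have hQm : (i : Int) < pvAv A m := by rw [hQ] at hQm'; simpa using hQm'
    have hmR : m ∈ R := List.mem_of_find?_eq_some hhd
    have hmin := pv_find?_min Q R (hR ▸ PySem.List.pairwise_lt_pyRange_one _ _) m hhd
    rcases hmemR m hmR with ⟨hm1, hm2⟩
    have hmnn : (0 : Int) ≤ m := by omega
    have hmcast : ((m.toNat : Nat) : Int) = m := by omega
    have hmtlt : m.toNat < A.length := by omega
    have hmem_cands : pvAv A m ∈ pvCands nums (i : Int) := by
      have hx := pv_corr_bwd nums i hi m.toNat hmtlt
        (show c < m.toNat by omega) (show (i : Int) < pvAv A ((m.toNat : Nat) : Int) by rw [hmcast]; exact hQm)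
      have hx2 : pvAv A ((m.toNat : Nat) : Int) ∈ pvCands nums (i : Int) := hx
      rw [← hmcast]
      exact hx2
    have hdomA : ∀ j ∈ pvCands nums (i : Int),
        pvV nums j < pvV nums (pvAv A m) ∨ (pvV nums j = pvV nums (pvAv A m) ∧ pvAv A m ≤ j) := by
      intro j hj
      rcases pv_corr_fwd nums i hi j hj with ⟨p, hplt0, hcp0, hAvp0⟩
      have hplt : p < A.length := hplt0
      have hcp : c < p := hcp0
      have hAvp : pvAv A ((p : Nat) : Int) = j := hAvp0
      have hjc := List.mem_filter.mp hj
      rcases PySem.List.mem_pyRange_one.mp hjc.1 with ⟨hj1, _⟩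
      have hpR : ((p : Nat) : Int) ∈ R := PySem.List.mem_pyRange_one.mpr ⟨by omega, by exact_mod_cast hplt⟩
      have hpQ : Q ((p : Nat) : Int) = true := decide_eq_true (by rw [hAvp]; omega)
      have hmp : m ≤ ((p : Nat) : Int) := by
        by_contra hcon
        have := hmin ((p : Nat) : Int) hpR (by omega)
        rw [hpQ] at this
        cases this
      by_cases heq : m = ((p : Nat) : Int)
      · right
        rw [heq, hAvp]
        exact ⟨rfl, le_refl _⟩
      · have hlt : m.toNat < p := by omega
        have hAvm : pvAv A m = A[m.toNat] := by
          conv_lhs => rw [← hmcast]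
          exact pv_av_getElem nums m.toNat hmtlt
        have hAvp' : A[p] = j := by rw [← pv_av_getElem nums p hplt, hAvp]
        rcases pv_arg_lex_at nums m.toNat p hmtlt hplt hlt with hlex | ⟨hlex, hidx⟩
        · left
          have h3 : -(pvV nums (A[m.toNat])) < -(pvV nums (A[p])) := by simpa using hlex
          rw [hAvp'] at h3
          rw [hAvm]
          omega
        · right
          have h3 : -(pvV nums (A[m.toNat])) = -(pvV nums (A[p])) := by simpa using hlex
          have h4 : A[m.toNat] < A[p] := hidx
          rw [hAvp'] at h3 h4
          rw [hAvm]
          exact ⟨by omega, by omega⟩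
    rcases pv_fold_char nums (i : Int) (pvCands nums (i : Int)) hcands_pw hcands_le with
      ⟨hnil, _⟩ | ⟨bi, hbimem, hfold, hdom⟩
    · rw [hnil] at hmem_cands
      cases hmem_cands
    · rw [hfold]
      have d1 := hdom (pvAv A m) hmem_cands
      have d2 := hdomA bi hbimem
      have : bi = pvAv A m := by
        rcases d1 with h | ⟨h, hle⟩ <;> rcases d2 with h' | ⟨h', hle'⟩ <;> omega
      rw [this]

theorem pv_B_eq_map (nums : List Int) :
    next_le_max_alt nums = (PySem.List.pyRange 0 (nums.length : Int) 1).map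
      (fun i => ((PySem.List.pyRange (i+1) (nums.length : Int) 1).foldl
        (pvBestStep nums i) (-1, none)).1) := by
  rw [next_le_max_alt]
  exact pv_foldl_append_singleton _ _ []

theorem pv_B_length (nums : List Int) : (next_le_max_alt nums).length = nums.length := by
  rw [pv_B_eq_map, List.length_map, PySem.List.length_pyRange_one]
  omega

theorem next_le_max_eq_alt (nums : List Int) : next_le_max nums = next_le_max_alt nums := by
  apply List.ext_getElem
  · rw [pv_A_length, pv_B_length]
  · intro k hk1 hk2
    have hkn : k < nums.length := by rw [pv_A_length] at hk1; exact hk1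
    have hA : (next_le_max nums)[k] = (next_le_max nums).getD k 0 := by
      rw [List.getD_eq_getElem?_getD, List.getElem?_eq_getElem hk1]
      rfl
    have hB : (next_le_max_alt nums)[k]? = some (((PySem.List.pyRange ((k : Int)+1) (nums.length : Int) 1).foldl
        (pvBestStep nums (k : Int)) (-1, none)).1) := by
      rw [pv_B_eq_map]
      exact PySem.List.getElem?_map_pyRange_zero _ _ _ hkn
    have hB' : (next_le_max_alt nums)[k] = ((PySem.List.pyRange ((k : Int)+1) (nums.length : Int) 1).foldl
        (pvBestStep nums (k : Int)) (-1, none)).1 := by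
      rw [← Option.some_inj, ← List.getElem?_eq_getElem hk2, hB]
    rw [hA, hB']
    rw [pv_A_getD nums k (by rw [pv_arg_length]; exact hkn)]
    rw [pv_out_eq nums k hkn, pv_best_eq_cands]

-- ===== VERDICT (by name: the statement is the Claim_ definition above) =====
theorem next_le_max_spec : Claim_equal_next_le_max := by
  intro nums _
  unfold Spec_next_le_max
  exact next_le_max_eq_alt nums
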